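-- pv_equiv track=rewrite | github.com/ZihaoZhai/Recommendation_System | similarityRule.py | add_filterStyle
-- ===== SOURCE A (Python) =====
-- def add_filterStyle(filterStyle, style_dict):
--     res = [0 for _ in range(len(style_dict))]
--     styles = filterStyle.split(',')
--     styles = [x for s in styles for x in s.split('&')]
--     for style in styles:
--         if style.strip() in style_dict.keys():
--             res[style_dict[style.strip()]] = 1
--
--     return res
-- ===== SOURCE B (Python) =====
-- def add_filterStyle(filterStyle, style_dict):
--     # Inverted loop: build the cleaned token set once, then scan the dict items.
--     tokens = {t.strip() for part in filterStyle.split(',') for t in part.split('&')}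
--     res = [0] * len(style_dict)
--     for key, idx in style_dict.items():
--         if key in tokens:
--             res[idx] = 1
--     return res
-- ===== Notes on version B (the rewrite author's own statement) =====
-- stated objective: alternative
-- what changed: B inverts the driving loop: it builds the set of cleaned tokens once and then iterates over the dict items, setting res[idx]=1 when the key is in the token set, instead of A's per-token key-membership test and dict lookup.
import Mathlib
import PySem

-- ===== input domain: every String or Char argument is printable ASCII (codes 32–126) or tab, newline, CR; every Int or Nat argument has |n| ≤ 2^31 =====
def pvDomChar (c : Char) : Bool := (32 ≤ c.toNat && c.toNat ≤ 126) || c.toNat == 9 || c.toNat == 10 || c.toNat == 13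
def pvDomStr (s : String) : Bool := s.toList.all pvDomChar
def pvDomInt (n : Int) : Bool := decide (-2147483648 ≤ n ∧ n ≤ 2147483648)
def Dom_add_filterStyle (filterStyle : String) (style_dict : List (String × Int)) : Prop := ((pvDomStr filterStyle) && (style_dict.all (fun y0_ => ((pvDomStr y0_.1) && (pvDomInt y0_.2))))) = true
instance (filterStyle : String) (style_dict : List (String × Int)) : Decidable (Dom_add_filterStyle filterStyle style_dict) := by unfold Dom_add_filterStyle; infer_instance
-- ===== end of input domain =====

-- ===== PORT A =====
-- B inverts A's driving loop (token-set + scan over dict items); equivalence of the return value is proved on Pre_.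
def add_filterStyle (filterStyle : String) (style_dict : List (String × Int)) : List Int :=
  let d := PySem.Dict.ofList style_dict
  let res : List Int := (List.range d.size).map (fun _ => 0)
  let styles := ((PySem.Str.split? filterStyle ",").getD [])   -- sep "," ≠ "", so split? is some
  let styles2 := styles.flatMap (fun s => (PySem.Str.split? s "&").getD [])
  styles2.foldl (fun r style =>
    if d.contains (PySem.Str.strip style) then
      PySem.List.pySetD r (d.getD (PySem.Str.strip style) 0) 1
    else r) res

-- ===== PORT B =====
def pvTokens (filterStyle : String) : PySem.Set String :=
  PySem.Set.ofList ((((PySem.Str.split? filterStyle ",").getD []).flatMap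
    (fun part => (PySem.Str.split? part "&").getD [])).map PySem.Str.strip)

def add_filterStyle_alt (filterStyle : String) (style_dict : List (String × Int)) : List Int :=
  let tokens := pvTokens filterStyle
  let d := PySem.Dict.ofList style_dict
  let res : List Int := List.replicate d.size 0
  d.items.foldl (fun r p =>
    if PySem.Set.contains tokens p.1 then PySem.List.pySetD r p.2 1 else r) res

-- ===== PRECONDITION & SPEC =====
-- Pre_ excludes exactly the inputs where Python A raises IndexError: some dict entry whose
-- (stripped) key occurs among the cleaned tokens carries an index outside [-n, n) for n = len(dict).
def Pre_add_filterStyle (filterStyle : String) (style_dict : List (String × Int)) : Prop :=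
  ∀ p ∈ (PySem.Dict.ofList style_dict).items,
    PySem.Set.contains (pvTokens filterStyle) p.1 = true →
      PySem.Raise.InRange (PySem.Dict.ofList style_dict).size p.2
instance (filterStyle : String) (style_dict : List (String × Int)) : Decidable (Pre_add_filterStyle filterStyle style_dict) := by unfold Pre_add_filterStyle; infer_instance

def pvWitness_add_filterStyle : String × (List (String × Int)) := ("a, b& c", [("a", 0), ("c", 1)])

def Spec_add_filterStyle (filterStyle : String) (style_dict : List (String × Int)) (out : List Int) : Prop := out = add_filterStyle_alt filterStyle style_dict
instance (filterStyle : String) (style_dict : List (String × Int)) (out : List Int) : Decidable (Spec_add_filterStyle filterStyle style_dict out) := by unfold Spec_add_filterStyle; infer_instance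

-- ===== CLAIM (what is proved, stated in full; the proofs are below) =====
def Claim_equal_add_filterStyle : Prop := ∀ (filterStyle : String) (style_dict : List (String × Int)), Dom_add_filterStyle filterStyle style_dict → Pre_add_filterStyle filterStyle style_dict → Spec_add_filterStyle filterStyle style_dict (add_filterStyle filterStyle style_dict)

-- ===== LEMMAS AND PROOFS =====

-- one Python assignment r[i] = v, read back at position j
theorem pv_getElem?_pySetD (r : List Int) (i : Int) (v : Int) (j : Nat) :
    (PySem.List.pySetD r i v)[j]? =
      if PySem.List.pyIdx? r.length i = some j then some v else r[j]? := by
  simp only [PySem.List.pySetD, PySem.List.pySet?]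
  rcases h : PySem.List.pyIdx? r.length i with _ | k
  · simp
  · have hk : k < r.length := by
      simp only [PySem.List.pyIdx?] at h
      split_ifs at h with h1 h2 h3 <;> simp_all <;> omega
    simp only [Option.map_some, Option.getD_some, List.getElem?_set]
    by_cases hjk : k = j
    · subst hjk; simp [hk]
    · simp [hjk]

-- the accumulating loop, read back elementwise
theorem pv_foldl_set_getElem? {β : Type} (l : List β) (c : β → Bool) (ix : β → Int)
    (res : List Int) (j : Nat) :
    (l.foldl (fun r x => if c x then PySem.List.pySetD r (ix x) 1 else r) res)[j]? =
      if (∃ x ∈ l, c x = true ∧ PySem.List.pyIdx? res.length (ix x) = some j)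
        then some 1 else res[j]? := by
  induction l generalizing res with
  | nil => simp
  | cons a l ih =>
    simp only [List.foldl_cons]
    by_cases ha : c a = true
    · rw [ih]
      simp only [ha, if_pos, PySem.List.length_pySetD]
      by_cases hrest : ∃ x ∈ l, c x = true ∧ PySem.List.pyIdx? res.length (ix x) = some j
      · rw [if_pos hrest, if_pos]
        exact ⟨_, List.mem_cons_of_mem _ hrest.choose_spec.1, hrest.choose_spec.2⟩
      · rw [if_neg hrest, pv_getElem?_pySetD]
        by_cases hhead : PySem.List.pyIdx? res.length (ix a) = some j
        · rw [if_pos hhead, if_pos ⟨a, List.mem_cons_self, ha, hhead⟩]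
        · rw [if_neg hhead, if_neg]
          rintro ⟨x, hx, hcx, hix⟩
          rcases List.mem_cons.mp hx with rfl | hx
          · exact hhead hix
          · exact hrest ⟨x, hx, hcx, hix⟩
    · rw [if_neg ha, ih]
      congr 1
      simp only [eq_iff_iff]
      constructor
      · rintro ⟨x, hx, hcx, hix⟩; exact ⟨x, List.mem_cons_of_mem _ hx, hcx, hix⟩
      · rintro ⟨x, hx, hcx, hix⟩
        rcases List.mem_cons.mp hx with rfl | hx
        · exact absurd hcx ha
        · exact ⟨x, hx, hcx, hix⟩

-- ===== VERDICT (by name: the statement is the Claim_ definition above) =====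
theorem add_filterStyle_spec : Claim_equal_add_filterStyle := by
  intro fs sd _ _
  unfold Spec_add_filterStyle add_filterStyle add_filterStyle_alt
  dsimp only
  set d := PySem.Dict.ofList sd with hd
  have hnd : d.keys.Nodup := PySem.Dict.nodup_keys_ofList sd
  set toks : List String :=
    (((PySem.Str.split? fs ",").getD []).flatMap
      (fun part => (PySem.Str.split? part "&").getD [])).map PySem.Str.strip with htoks
  have hA :
      (((PySem.Str.split? fs ",").getD []).flatMap
        (fun s => (PySem.Str.split? s "&").getD [])).foldl
        (fun r style => if d.contains (PySem.Str.strip style) then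
            PySem.List.pySetD r (d.getD (PySem.Str.strip style) 0) 1 else r)
        ((List.range d.size).map (fun _ => (0:Int)))
      = toks.foldl (fun r t => if d.contains t then PySem.List.pySetD r (d.getD t 0) 1 else r)
        ((List.range d.size).map (fun _ => (0:Int))) := by
    rw [htoks, List.foldl_map]
  rw [hA]
  have hz : ((List.range d.size).map (fun _ => (0:Int))) = List.replicate d.size 0 := by
    simp
  rw [hz]
  apply List.ext_getElem?
  intro j
  rw [pv_foldl_set_getElem? toks (fun t => d.contains t) (fun t => d.getD t 0)
        (List.replicate d.size 0) j,
      pv_foldl_set_getElem? d.items (fun p => PySem.Set.contains (pvTokens fs) p.1)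
        (fun p => p.2) (List.replicate d.size 0) j]
  congr 1
  simp only [eq_iff_iff]
  constructor
  · rintro ⟨t, ht, hct, hix⟩
    have hkeys : t ∈ d.keys := (PySem.Dict.contains_iff_mem_keys d t).mp hct
    rcases List.mem_map.mp hkeys with ⟨p, hp, hp1⟩
    refine ⟨p, hp, ?_, ?_⟩
    · rw [PySem.Set.contains_iff, hp1]
      exact (PySem.Set.mem_ofList _ _).mpr ht
    · have : d.getD t 0 = p.2 := by
        have := PySem.Dict.getD_of_mem_items (d := d) (k := p.1) (v := p.2)
          (by exact (by rw [Prod.mk.eta]; exact hp)) hnd 0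
        rw [hp1] at this; exact this
      rwa [this] at hix
  · rintro ⟨p, hp, hct, hix⟩
    have ht : p.1 ∈ toks := by
      have := (PySem.Set.contains_iff _ _).mp hct
      rw [pvTokens] at this
      exact (PySem.Set.mem_ofList _ _).mp this
    refine ⟨p.1, ht, ?_, ?_⟩
    · exact (PySem.Dict.contains_iff_mem_keys d p.1).mpr
        (List.mem_map.mpr ⟨p, hp, rfl⟩)
    · have : d.getD p.1 0 = p.2 :=
        PySem.Dict.getD_of_mem_items (d := d) (by rw [Prod.mk.eta]; exact hp) hnd 0
      rwa [this]
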